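-- pv_equiv track=rewrite | github.com/FloBoticsTech/Ventus-1 | GUI/API/main.py | two2dec
-- ===== SOURCE A (Python) =====
-- def two2dec(s):
--     int_value = int(s, base=16)
--     bin_value = bin(int_value)
--     s = str(bin_value)[2:]
--     if len(s) != 8:
--         num = 8 - len(s)
--         s = '0'*num + s
--     if s[0] == '1':
--         return -1 * (int(''.join('1' if x == '0' else '0' for x in s), 2) + 1)
--     else:
--         return int(s, 2)
-- ===== SOURCE B (Python) =====
-- def two2dec(s):
--     v = int(s, base=16)
--     if v < 0:
--         raise ValueError("not a two's-complement hex encoding: " + s)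
--     if v < 128:
--         return v
--     return v - (1 << v.bit_length())
-- ===== Notes on version B (the rewrite author's own statement) =====
-- stated objective: simpler
-- what changed: Replaces A's binary-string formatting, zero-padding and char-by-char complementing with a purely arithmetic closed form: v when v < 128, else v - 2**v.bit_length(); sign-prefixed (negative-parsing) hex input is rejected with ValueError.
-- outside the precondition, e.g. on two2dec('-20'): A returns 32, B raises ValueError
import Mathlib
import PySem

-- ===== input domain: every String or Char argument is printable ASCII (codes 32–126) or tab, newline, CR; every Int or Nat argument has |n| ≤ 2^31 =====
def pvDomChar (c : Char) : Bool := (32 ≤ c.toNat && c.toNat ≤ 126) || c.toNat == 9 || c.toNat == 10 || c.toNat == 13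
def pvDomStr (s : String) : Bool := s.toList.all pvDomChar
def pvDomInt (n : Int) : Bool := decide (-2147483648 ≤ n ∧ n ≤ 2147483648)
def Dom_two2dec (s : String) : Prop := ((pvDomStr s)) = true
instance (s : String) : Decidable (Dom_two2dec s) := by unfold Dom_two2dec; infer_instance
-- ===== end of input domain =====

-- B replaces A's binary-string formatting, padding and char-complementing with the arithmetic
-- closed form "v if v < 128 else v - (1 << v.bit_length())" (objective: simpler); like A on most
-- negative parses, B raises ValueError on every sign-prefixed (negative-parsing) hex string.


-- ===== PORT A =====
-- int(x, 2) ported by hand: on every argument A passes to int(.,2) on an input admitted by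
-- Pre_ — a nonempty string of binary digits — this computes exactly Python's value.
def binVal (cs : List Char) : Int :=
  cs.foldl (fun a c => 2 * a + (if c = '1' then 1 else 0)) 0

def two2dec (s : String) : Int :=
  match PySem.Int.ofStrBase? s 16 with
  | none => 0        -- int(s, 16) raised ValueError: excluded by Pre_
  | some intValue =>
    -- s = str(bin(int_value))[2:]
    let s1 := PySem.List.slice (PySem.Int.pyBin intValue).toList (some 2) none
    -- if len(s) != 8: s = '0'*(8 - len(s)) + s
    let s2 := if s1.length ≠ 8 then PySem.List.pyRepeat ['0'] (8 - (s1.length : Int)) ++ s1 else s1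
    match PySem.List.pyGet? s2 0 with
    | none => 0      -- s[0] IndexError (never reached: s2 is nonempty)
    | some c =>
      if c = '1' then -1 * (binVal (s2.map (fun x => if x = '0' then '1' else '0')) + 1)
      else binVal s2 -- int(s, 2); where Python raises ValueError instead, Pre_ excludes the input

-- ===== PORT B =====
def two2dec_alt (s : String) : Int :=
  match PySem.Int.ofStrBase? s 16 with
  | none => 0        -- int(s, 16) raised ValueError: excluded by Pre_
  | some v =>
    if v < 0 then 0  -- B raises ValueError here: excluded by Pre_
    else if v < 128 then v else v - (1 <<< PySem.Int.bitLength v)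

-- ===== PRECONDITION & SPEC =====
-- Pre_ admits exactly the hex strings parsing to a nonnegative value. It excludes sign-prefixed
-- (negative-parsing) hex strings, which are not two's-complement byte encodings: A raises
-- ValueError on almost all of them, and on the few where its zero-padding accidentally rebuilds
-- a parseable binary prefix (v in [-63,-32]) its returned value |v| is an implementation
-- accident no caller could rely on; B raises ValueError on all of them.
def Pre_two2dec (s : String) : Prop :=
  (PySem.Int.ofStrBase? s 16).isSome = true ∧ 0 ≤ (PySem.Int.ofStrBase? s 16).getD 0
instance (s : String) : Decidable (Pre_two2dec s) := by unfold Pre_two2dec; infer_instance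
def pvWitness_two2dec : String := "ff"

def Spec_two2dec (s : String) (out : Int) : Prop := out = two2dec_alt s
instance (s : String) (out : Int) : Decidable (Spec_two2dec s out) := by unfold Spec_two2dec; infer_instance

-- ===== CLAIM (what is proved, stated in full; the proofs are below) =====
def Claim_equal_two2dec : Prop := ∀ (s : String), Dom_two2dec s → Pre_two2dec s → Spec_two2dec s (two2dec s)

-- ===== LEMMAS AND PROOFS =====

theorem binVal_foldl (cs : List Char) (a : Int) :
    cs.foldl (fun a c => 2 * a + (if c = '1' then 1 else 0)) a
      = a * 2 ^ cs.length + binVal cs := by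
  induction cs generalizing a with
  | nil => simp [binVal]
  | cons c t ih =>
    simp only [List.foldl_cons, List.length_cons, binVal]
    rw [ih, ih]
    ring

theorem binVal_cons (c : Char) (cs : List Char) :
    binVal (c :: cs) = (if c = '1' then 1 else 0) * 2 ^ cs.length + binVal cs := by
  rw [show binVal (c :: cs)
        = cs.foldl (fun a c => 2 * a + (if c = '1' then 1 else 0))
            (2 * 0 + (if c = '1' then 1 else 0)) from rfl,
      binVal_foldl]
  ring

theorem binVal_append (xs ys : List Char) :
    binVal (xs ++ ys) = binVal xs * 2 ^ ys.length + binVal ys := by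
  simp only [binVal, List.foldl_append]
  rw [binVal_foldl]
  rfl

theorem binVal_replicate_zero (k : Nat) : binVal (List.replicate k '0') = 0 := by
  induction k with
  | zero => rfl
  | succ n ih => rw [List.replicate_succ, binVal_cons]; simp [ih]

theorem binVal_flip (cs : List Char) (h : ∀ c ∈ cs, c = '0' ∨ c = '1') :
    binVal (cs.map (fun x => if x = '0' then '1' else '0'))
      = 2 ^ cs.length - 1 - binVal cs := by
  induction cs with
  | nil => simp [binVal]
  | cons c t ih =>
    rw [List.map_cons, binVal_cons, binVal_cons,
      ih (fun c hc => h c (List.mem_cons_of_mem _ hc))]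
    rcases h c List.mem_cons_self with hc | hc <;>
      simp [hc, List.length_cons, pow_succ] <;> ring

theorem toDigitsCore_two_eq (fuel : Nat) : ∀ (n : Nat) (acc : List Char), n < fuel → 0 < n →
    Nat.toDigitsCore 2 fuel n acc = ((Nat.digits 2 n).map Nat.digitChar).reverse ++ acc := by
  induction fuel with
  | zero => intro n acc h; omega
  | succ f ih =>
    intro n acc h hn
    rw [Nat.digits_def' (by norm_num : 1 < 2) hn]
    simp only [Nat.toDigitsCore, List.map_cons, List.reverse_cons]
    by_cases h2 : n / 2 = 0
    · rw [if_pos h2, h2]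
      simp
    · rw [if_neg h2, ih (n / 2) _ (by omega) (by omega)]
      simp

theorem toDigits_two_eq (n : Nat) (hn : 0 < n) :
    Nat.toDigits 2 n = ((Nat.digits 2 n).map Nat.digitChar).reverse := by
  rw [show Nat.toDigits 2 n = Nat.toDigitsCore 2 (n + 1) n [] from rfl,
    toDigitsCore_two_eq (n + 1) n [] (by omega) hn]
  simp

theorem bitLength_eq_digits_len (n : Nat) :
    PySem.Int.bitLength (n : Int) = (Nat.digits 2 n).length := by
  induction n using Nat.strong_induction_on with
  | _ n ih =>
    by_cases hn : n = 0
    · subst hn; decide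
    · rw [PySem.Int.bitLength_natCast (by omega), Nat.digits_def' (by norm_num : 1 < 2) (by omega),
        List.length_cons, ih (n / 2) (by omega)]

theorem binVal_digits (L : List Nat) (h : ∀ d ∈ L, d < 2) :
    binVal ((L.map Nat.digitChar).reverse) = (Nat.ofDigits 2 L : Nat) := by
  induction L with
  | nil => simp [binVal]
  | cons d t ih =>
    rw [List.map_cons, List.reverse_cons, binVal_append,
      ih (fun d hd => h d (List.mem_cons_of_mem _ hd)), Nat.ofDigits_cons]
    have hd : d = 0 ∨ d = 1 := by have := h d List.mem_cons_self; omega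
    rcases hd with hd | hd <;> subst hd <;>
      simp [binVal, Nat.digitChar] <;> push_cast <;> ring

theorem toDigits_two_binary (n : Nat) (hn : 0 < n) :
    ∀ c ∈ Nat.toDigits 2 n, c = '0' ∨ c = '1' := by
  rw [toDigits_two_eq n hn]
  intro c hc
  rw [List.mem_reverse, List.mem_map] at hc
  obtain ⟨d, hd, rfl⟩ := hc
  have := Nat.digits_lt_base (by norm_num) hd
  interval_cases d <;> simp [Nat.digitChar]

theorem toDigits_two_head (n : Nat) (hn : 0 < n) :
    ∃ t, Nat.toDigits 2 n = '1' :: t := by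
  rw [toDigits_two_eq n hn]
  have hne : Nat.digits 2 n ≠ [] := Nat.digits_ne_nil_iff_ne_zero.mpr (by omega)
  have hne2 : (Nat.digits 2 n).map Nat.digitChar ≠ [] := by simpa using hne
  refine ⟨((Nat.digits 2 n).map Nat.digitChar).dropLast.reverse, ?_⟩
  rw [← List.dropLast_append_getLast hne2, List.reverse_append]
  have hlast : ((Nat.digits 2 n).map Nat.digitChar).getLast hne2 = '1' := by
    rw [List.getLast_map]
    have h1 := Nat.getLast_digit_ne_zero 2 (show n ≠ 0 by omega)
    have h2 := Nat.digits_lt_base (by norm_num) (List.getLast_mem hne)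
    have : (Nat.digits 2 n).getLast hne = 1 := by omega
    rw [this]; decide
  rw [hlast]
  simp

theorem toDigits_two_len (n : Nat) (hn : 0 < n) :
    (Nat.toDigits 2 n).length = (Nat.digits 2 n).length := by
  rw [toDigits_two_eq n hn]; simp

theorem binVal_toDigits (n : Nat) (hn : 0 < n) :
    binVal (Nat.toDigits 2 n) = (n : Int) := by
  rw [toDigits_two_eq n hn, binVal_digits _ (fun d hd => Nat.digits_lt_base (by norm_num) hd),
    Nat.ofDigits_digits]

theorem body_eq (v : Int) (hv : 0 ≤ v) :
    (let s1 := PySem.List.slice (PySem.Int.pyBin v).toList (some 2) none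
     let s2 := if s1.length ≠ 8 then PySem.List.pyRepeat ['0'] (8 - (s1.length : Int)) ++ s1 else s1
     match PySem.List.pyGet? s2 0 with
     | none => 0
     | some c =>
       if c = '1' then -1 * (binVal (s2.map (fun x => if x = '0' then '1' else '0')) + 1)
       else binVal s2)
      = if v < 128 then v else v - ((1:Int) <<< PySem.Int.bitLength v) := by
  rcases eq_or_lt_of_le hv with h0 | hpos
  · rw [← h0]; decide
  · have hn : 0 < v.toNat := by omega
    have hvn : (v.toNat : Int) = v := Int.toNat_of_nonneg hv
    have hnabs : v.natAbs = v.toNat := by omega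
    obtain ⟨t, ht⟩ := toDigits_two_head v.toNat hn
    have hbin := toDigits_two_binary v.toNat hn
    have hval := binVal_toDigits v.toNat hn
    have hlen := toDigits_two_len v.toNat hn
    have hbl : PySem.Int.bitLength v = (Nat.digits 2 v.toNat).length := by
      rw [← hvn]; exact bitLength_eq_digits_len v.toNat
    set L := (Nat.digits 2 v.toNat).length with hLd
    have hub : v.toNat < 2 ^ L := by
      have := PySem.Int.lt_two_pow_bitLength v; rwa [hbl, hnabs] at this
    have hlb : 2 ^ (L - 1) ≤ v.toNat := by
      have := PySem.Int.two_pow_bitLength_le v (by omega); rwa [hbl, hnabs] at this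
    have hL1 : 1 ≤ L := by
      by_contra h
      have : L = 0 := by omega
      rw [this] at hub; simp at hub; omega
    have hslice : ∀ xs : List Char, PySem.List.slice xs (some 2) = xs.drop (2:Int).toNat :=
      fun xs => PySem.List.slice_from xs (by norm_num)
    simp only [PySem.Int.toList_pyBin, PySem.Int.toBinChars0b, if_neg (by omega : ¬ v < 0),
      hslice]
    simp only [show ((2:Int).toNat) = 2 from rfl, List.drop_succ_cons, List.drop_zero]
    set ds := Nat.toDigits 2 v.toNat with hdsd
    by_cases hc : L < 8
    · have hlen8 : ds.length ≠ 8 := by omega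
      have hrep : ((8:Int) - (ds.length : Int)).toNat = (8 - L - 1) + 1 := by omega
      simp only [if_pos hlen8, PySem.List.pyRepeat_singleton, hrep, List.replicate_succ,
        List.cons_append]
      rw [show PySem.List.pyGet? ('0' :: (List.replicate (8 - L - 1) '0' ++ ds)) 0
            = some '0' by simp [pysem]]
      simp only [show ('0' : Char) ≠ '1' by decide, reduceIte]
      rw [show ('0' :: (List.replicate (8 - L - 1) '0' ++ ds))
            = List.replicate ((8 - L - 1) + 1) '0' ++ ds by simp [List.replicate_succ]]
      rw [binVal_append, binVal_replicate_zero, hval]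
      have : v < 128 := by
        have h27 : (2:Nat) ^ L ≤ 2 ^ 7 := Nat.pow_le_pow_right (by norm_num) (by omega)
        omega
      rw [if_pos this]
      omega
    · have hs2 : (if ds.length ≠ 8 then
            PySem.List.pyRepeat ['0'] (8 - (ds.length : Int)) ++ ds else ds) = ds := by
        by_cases h8 : ds.length = 8
        · simp [h8]
        · have : ((8:Int) - (ds.length : Int)).toNat = 0 := by omega
          simp [h8, PySem.List.pyRepeat_singleton, this]
      rw [hs2]
      rw [ht, show PySem.List.pyGet? ('1' :: t) 0 = some '1' by simp [pysem]]
      simp only [reduceIte]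
      rw [← ht, binVal_flip ds hbin, hval, hlen]
      have hge : ¬ v < 128 := by
        have h27 : (2:Nat) ^ 7 ≤ 2 ^ (L - 1) := Nat.pow_le_pow_right (by norm_num) (by omega)
        omega
      rw [if_neg hge, hbl, Int.shiftLeft_eq, ← hvn]
      ring_nf
      simp

-- ===== VERDICT (by name: the statement is the Claim_ definition above) =====
theorem two2dec_spec : Claim_equal_two2dec := by
  intro s _ hpre
  unfold Spec_two2dec
  unfold two2dec two2dec_alt
  cases hp : PySem.Int.ofStrBase? s 16 with
  | none =>
    rw [Pre_two2dec, hp] at hpre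
  | some v =>
    unfold Pre_two2dec at hpre
    rw [hp] at hpre
    simp only [Option.isSome_some, Option.getD_some] at hpre
    have hv : 0 ≤ v := hpre.2
    simp only [if_neg (by omega : ¬ v < 0)]
    exact body_eq v hv
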